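-- pv_equiv track=rewrite | github.com/rlaboiss/mwrap | python/mwrap_lexer.py | _fname_scan_line
-- ===== SOURCE A (Python) =====
-- def _is_name_char(c):
--     return c.isalnum() or c == '_'
--
-- def _fname_scan_line(text):
--     """Extract function name from '@function ...' tail, return name.m."""
--     paren = text.find('(')
--     if paren < 0:
--         paren = len(text)
--     # Walk back from paren to find last alnum
--     end = paren
--     while end > 0 and not _is_name_char(text[end - 1]):
--         end -= 1
--     start = end
--     while start > 0 and _is_name_char(text[start - 1]):
--         start -= 1
--     name = text[start:end]
--     return name + ".m"
-- ===== SOURCE B (Python) =====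
-- def _is_name_char(c):
--     return c.isalnum() or c == '_'
--
-- def _fname_scan_line(text):
--     """Extract function name from '@function ...' tail, return name.m."""
--     paren = text.find('(')
--     pref = text[:paren] if paren >= 0 else text
--     last = ""
--     cur = ""
--     for c in pref:
--         if _is_name_char(c):
--             cur += c
--         else:
--             if cur:
--                 last = cur
--             cur = ""
--     return (cur if cur else last) + ".m"
-- ===== Notes on version B (the rewrite author's own statement) =====
-- stated objective: alternative
-- what changed: Replaces A's two backward index-walks from the open-parenthesis position with a single forward pass over the prefix that accumulates runs of name characters and keeps the last completed run.
import Mathlib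
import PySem

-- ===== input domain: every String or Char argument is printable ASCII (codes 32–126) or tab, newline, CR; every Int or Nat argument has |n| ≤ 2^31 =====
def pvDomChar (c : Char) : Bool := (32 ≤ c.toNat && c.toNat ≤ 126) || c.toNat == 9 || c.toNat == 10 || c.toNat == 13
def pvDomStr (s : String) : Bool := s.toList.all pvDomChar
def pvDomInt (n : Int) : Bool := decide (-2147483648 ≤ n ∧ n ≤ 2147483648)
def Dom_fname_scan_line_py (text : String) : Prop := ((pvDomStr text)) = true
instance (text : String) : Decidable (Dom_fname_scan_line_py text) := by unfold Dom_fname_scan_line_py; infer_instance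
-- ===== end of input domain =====

-- B replaces A's two backward index-walks from the open-parenthesis position with one forward
-- pass accumulating runs of name characters and keeping the last completed run.

-- ===== PORT A =====
-- port of _is_name_char
def pvIsName (c : Char) : Bool := PySem.Chars.isalnum c || c == '_'

-- 'while end > 0 and not _is_name_char(text[end-1]): end -= 1'
def pvWalkEnd (cs : List Char) : Nat → Nat
  | 0 => 0
  | e + 1 => if !pvIsName (cs.getD e ' ') then pvWalkEnd cs e else e + 1

-- 'while start > 0 and _is_name_char(text[start-1]): start -= 1'
def pvWalkStart (cs : List Char) : Nat → Nat
  | 0 => 0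
  | s + 1 => if pvIsName (cs.getD s ' ') then pvWalkStart cs s else s + 1

def fname_scan_line_py (text : String) : String :=
  let cs := text.toList
  let paren0 := PySem.Chars.find cs ['(']
  let paren : Nat := if paren0 < 0 then cs.length else paren0.toNat
  let e := pvWalkEnd cs paren
  let s := pvWalkStart cs e
  String.ofList (PySem.List.slice cs (some (s : Int)) (some (e : Int))) ++ ".m"

-- ===== PORT B =====
-- one forward step: extend the current run, or (on a separator) record it as 'last'
def pvStep (st : List Char × List Char) (c : Char) : List Char × List Char :=
  if pvIsName c then (st.1, st.2 ++ [c])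
  else (if st.2 ≠ [] then st.2 else st.1, [])

def fname_scan_line_py_alt (text : String) : String :=
  let cs := text.toList
  let paren := PySem.Chars.find cs ['(']
  let pref := if 0 ≤ paren then PySem.List.slice cs none (some paren) else cs
  let st := pref.foldl pvStep ([], [])
  String.ofList (if st.2 ≠ [] then st.2 else st.1) ++ ".m"

-- ===== PRECONDITION & SPEC =====
def Spec_fname_scan_line_py (text : String) (out : String) : Prop := out = fname_scan_line_py_alt text
instance (text : String) (out : String) : Decidable (Spec_fname_scan_line_py text out) := by unfold Spec_fname_scan_line_py; infer_instance

-- ===== CLAIM (what is proved, stated in full; the proofs are below) =====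
def Claim_equal_fname_scan_line_py : Prop := ∀ (text : String), Dom_fname_scan_line_py text → Spec_fname_scan_line_py text (fname_scan_line_py text)

-- ===== LEMMAS AND PROOFS =====

-- the intended result, on the reversed prefix: the last maximal run of name chars
def pvRtnRev (r : List Char) : List Char :=
  (r.dropWhile (fun c => !pvIsName c)).takeWhile pvIsName

lemma pvWalkEnd_append (q r : List Char) (e : Nat) (h : e ≤ q.length) :
    pvWalkEnd (q ++ r) e = pvWalkEnd q e := by
  induction e with
  | zero => rfl
  | succ e ih =>
    have hg : (q ++ r).getD e ' ' = q.getD e ' ' := by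
      simp [List.getD, List.getElem?_append_left (by omega : e < q.length)]
    simp only [pvWalkEnd, hg, ih (by omega)]

lemma pvWalkStart_append (q r : List Char) (s : Nat) (h : s ≤ q.length) :
    pvWalkStart (q ++ r) s = pvWalkStart q s := by
  induction s with
  | zero => rfl
  | succ s ih =>
    have hg : (q ++ r).getD s ' ' = q.getD s ' ' := by
      simp [List.getD, List.getElem?_append_left (by omega : s < q.length)]
    simp only [pvWalkStart, hg, ih (by omega)]

lemma pvWalkEnd_full (p : List Char) :
    pvWalkEnd p p.length = (p.reverse.dropWhile (fun c => !pvIsName c)).length := by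
  induction p using List.reverseRecOn with
  | nil => rfl
  | append_singleton q c ih =>
    have hg : (q ++ [c]).getD q.length ' ' = c := by simp [List.getD]
    have hA : pvWalkEnd (q ++ [c]) q.length = pvWalkEnd q q.length :=
      pvWalkEnd_append q [c] q.length (le_refl _)
    by_cases hc : pvIsName c
    · simp [pvWalkEnd, hg, hc, List.dropWhile_cons]
    · simp [pvWalkEnd, hg, hc, hA, ih, List.dropWhile_cons]

lemma pvWalkStart_full (p : List Char) :
    pvWalkStart p p.length = (p.reverse.dropWhile pvIsName).length := by
  induction p using List.reverseRecOn with
  | nil => rfl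
  | append_singleton q c ih =>
    have hg : (q ++ [c]).getD q.length ' ' = c := by simp [List.getD]
    have hA : pvWalkStart (q ++ [c]) q.length = pvWalkStart q q.length :=
      pvWalkStart_append q [c] q.length (le_refl _)
    by_cases hc : pvIsName c
    · simp [pvWalkStart, hg, hc, hA, ih, List.dropWhile_cons]
    · simp [pvWalkStart, hg, hc, List.dropWhile_cons]

-- A's slice over the whole string equals the last run of the prefix cs.take n
lemma pvA_key (cs : List Char) (n : Nat) (hn : n ≤ cs.length) :
    PySem.List.slice cs (some ((pvWalkStart cs (pvWalkEnd cs n) : Nat) : Int))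
      (some ((pvWalkEnd cs n : Nat) : Int))
      = (pvRtnRev (cs.take n).reverse).reverse := by
  set p : List Char := cs.take n with hp
  have hpl : p.length = n := by simp [hp, hn]
  have hcs : cs = p ++ cs.drop n := by simp [hp]
  have hE : pvWalkEnd cs n = pvWalkEnd p p.length := by
    rw [hpl]; conv_lhs => rw [hcs]
    exact pvWalkEnd_append _ _ _ (by omega)
  set t : List Char := p.reverse.takeWhile (fun c => !pvIsName c) with ht
  set d : List Char := p.reverse.dropWhile (fun c => !pvIsName c) with hd
  have hsplit : p = d.reverse ++ t.reverse := by
    have h1 : p.reverse = t ++ d := (List.takeWhile_append_dropWhile).symm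
    calc p = p.reverse.reverse := by simp
    _ = d.reverse ++ t.reverse := by rw [h1, List.reverse_append]
  have he : pvWalkEnd cs n = d.length := by rw [hE, pvWalkEnd_full, ← hd]
  have hq : cs = d.reverse ++ (t.reverse ++ cs.drop n) := by
    conv_lhs => rw [hcs]
    rw [hsplit, List.append_assoc]
  have hS : pvWalkStart cs (pvWalkEnd cs n) = (d.dropWhile pvIsName).length := by
    rw [he]
    conv_lhs => rw [hq]
    rw [pvWalkStart_append d.reverse _ d.length (by simp)]
    have h2 := pvWalkStart_full d.reverse
    simpa using h2
  have hsle : (d.dropWhile pvIsName).length ≤ d.length :=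
    (List.dropWhile_sublist (l := d) (p := pvIsName)).length_le
  rw [hS, he, PySem.List.slice_natCast]
  conv_lhs => rw [hq]
  rw [List.drop_append_of_le_length (by simpa using hsle),
      List.take_append_of_le_length (by simp),
      show d.length - (d.dropWhile pvIsName).length
          = (d.reverse.drop (d.dropWhile pvIsName).length).length by simp,
      List.take_length]
  have hd2 : d.reverse = (d.dropWhile pvIsName).reverse ++ (d.takeWhile pvIsName).reverse := by
    conv_lhs => rw [← List.takeWhile_append_dropWhile (p := pvIsName) (l := d)]
    rw [List.reverse_append]
  rw [hd2, List.drop_append_of_le_length (by simp)]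
  simp [pvRtnRev, ← hd]

-- rtn of a reversed list, split at the trailing run
lemma pvRtn_split (r : List Char) :
    pvRtnRev r = if r.takeWhile pvIsName = [] then pvRtnRev (r.dropWhile pvIsName)
                 else r.takeWhile pvIsName := by
  cases r with
  | nil => simp [pvRtnRev]
  | cons c t =>
    by_cases hc : pvIsName c
    · simp [pvRtnRev, List.takeWhile_cons, List.dropWhile_cons, hc]
    · simp [pvRtnRev, List.takeWhile_cons, List.dropWhile_cons, hc]

-- invariant of B's fold: (last completed run, current trailing run)
lemma pvFoldl_inv (p : List Char) :
    p.foldl pvStep ([], []) =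
      ((pvRtnRev (p.reverse.dropWhile pvIsName)).reverse,
       (p.reverse.takeWhile pvIsName).reverse) := by
  induction p using List.reverseRecOn with
  | nil => rfl
  | append_singleton q c ih =>
    rw [List.foldl_append, ih]
    by_cases hc : pvIsName c
    · simp [pvStep, hc, List.reverse_append, List.takeWhile_cons, List.dropWhile_cons]
    · simp only [pvStep, hc, Bool.false_eq_true, if_false, List.foldl_cons, List.foldl_nil,
        List.reverse_append, List.reverse_singleton, List.singleton_append,
        List.takeWhile_cons, List.dropWhile_cons, Bool.not_false, if_true, List.reverse_nil]
      refine Prod.ext ?_ rfl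
      rw [show pvRtnRev (c :: q.reverse) = pvRtnRev q.reverse from by
            simp [pvRtnRev, List.dropWhile_cons, hc]]
      rw [pvRtn_split (q.reverse)]
      by_cases hT : q.reverse.takeWhile pvIsName = []
      · simp [hT]
      · simp [hT, List.reverse_eq_nil_iff]

lemma pvB_key (p : List Char) :
    (if (p.foldl pvStep ([], [])).2 ≠ [] then (p.foldl pvStep ([], [])).2
     else (p.foldl pvStep ([], [])).1)
      = (pvRtnRev p.reverse).reverse := by
  rw [pvFoldl_inv, pvRtn_split (p.reverse)]
  by_cases hT : p.reverse.takeWhile pvIsName = []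
  · simp [hT]
  · simp [hT, List.reverse_eq_nil_iff]

-- ===== VERDICT (by name: the statement is the Claim_ definition above) =====
theorem fname_scan_line_py_spec : Claim_equal_fname_scan_line_py := by
  intro text _
  unfold Spec_fname_scan_line_py fname_scan_line_py fname_scan_line_py_alt
  simp only []
  set cs := text.toList with hcs
  set f := PySem.Chars.find cs ['('] with hf
  by_cases h : f < 0
  · rw [if_pos h, if_neg (show ¬ ((0:Int) ≤ f) by omega)]
    rw [pvA_key cs cs.length (le_refl _), pvB_key cs]
    simp
  · rw [if_neg h, if_pos (show (0:Int) ≤ f by omega)]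
    have hle : f.toNat ≤ cs.length := by
      have := PySem.Chars.find_le_length (s := cs) (sub := ['('])
      omega
    have hfn : f = ((f.toNat : Nat) : Int) := by omega
    rw [hfn, PySem.List.slice_to_natCast]
    simp only [Int.toNat_natCast]
    rw [pvA_key cs f.toNat hle, pvB_key (cs.take f.toNat)]
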